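-- pv_equiv track=rewrite | github.com/ArifAbbas11/Personal-AI-Employee | watchers/ml_engine/email_classifier.py | generate_sample_training_data
-- ===== SOURCE A (Python) =====
-- from typing import Any, Dict, List, Optional
--
-- def generate_sample_training_data(count: int = 50) -> List[Dict[str, Any]]:
--     """
--     Generate sample training data for testing.
--
--     Args:
--         count: Number of samples to generate
--
--     Returns:
--         List of training examples
--     """
--     samples = [
--         # Urgent
--         {'text': 'URGENT: Server down, production affected', 'category': 'urgent'},
--         {'text': 'Critical bug in payment system', 'category': 'urgent'},
--         {'text': 'Emergency meeting in 10 minutes', 'category': 'urgent'},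
--         {'text': 'Security breach detected', 'category': 'urgent'},
--         {'text': 'Immediate action required: data loss', 'category': 'urgent'},
--
--         # Important
--         {'text': 'Quarterly review meeting tomorrow', 'category': 'important'},
--         {'text': 'Please review and approve budget', 'category': 'important'},
--         {'text': 'Contract needs your signature', 'category': 'important'},
--         {'text': 'Project deadline approaching', 'category': 'important'},
--         {'text': 'Client feedback on proposal', 'category': 'important'},
--
--         # Spam
--         {'text': 'You won a million dollars! Click here', 'category': 'spam'},
--         {'text': 'Enlarge your business today!!!', 'category': 'spam'},
--         {'text': 'Free money waiting for you', 'category': 'spam'},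
--         {'text': 'Nigerian prince needs your help', 'category': 'spam'},
--         {'text': 'Congratulations! You are a winner', 'category': 'spam'},
--
--         # Promotional
--         {'text': '50% off all products this weekend', 'category': 'promotional'},
--         {'text': 'New features in our latest release', 'category': 'promotional'},
--         {'text': 'Subscribe to our newsletter', 'category': 'promotional'},
--         {'text': 'Special offer just for you', 'category': 'promotional'},
--         {'text': 'Join our webinar next week', 'category': 'promotional'},
--
--         # Informational
--         {'text': 'Weekly team update', 'category': 'informational'},
--         {'text': 'FYI: New office hours', 'category': 'informational'},
--         {'text': 'Documentation has been updated', 'category': 'informational'},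
--         {'text': 'Reminder: company holiday next week', 'category': 'informational'},
--         {'text': 'Monthly newsletter', 'category': 'informational'},
--     ]
--
--     # Repeat samples to reach desired count
--     while len(samples) < count:
--         samples.extend(samples[:min(len(samples), count - len(samples))])
--
--     return samples[:count]
-- ===== SOURCE B (Python) =====
-- from typing import Any, Dict, List
--
-- def generate_sample_training_data(count: int = 50) -> List[Dict[str, Any]]:
--     """Build the base from (category, texts) groups, then tile it with list
--     multiplication plus a remainder slice instead of a doubling loop."""
--     groups = [
--         ('urgent', [
--             'URGENT: Server down, production affected',
--             'Critical bug in payment system',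
--             'Emergency meeting in 10 minutes',
--             'Security breach detected',
--             'Immediate action required: data loss',
--         ]),
--         ('important', [
--             'Quarterly review meeting tomorrow',
--             'Please review and approve budget',
--             'Contract needs your signature',
--             'Project deadline approaching',
--             'Client feedback on proposal',
--         ]),
--         ('spam', [
--             'You won a million dollars! Click here',
--             'Enlarge your business today!!!',
--             'Free money waiting for you',
--             'Nigerian prince needs your help',
--             'Congratulations! You are a winner',
--         ]),
--         ('promotional', [
--             '50% off all products this weekend',
--             'New features in our latest release',
--             'Subscribe to our newsletter',
--             'Special offer just for you',
--             'Join our webinar next week',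
--         ]),
--         ('informational', [
--             'Weekly team update',
--             'FYI: New office hours',
--             'Documentation has been updated',
--             'Reminder: company holiday next week',
--             'Monthly newsletter',
--         ]),
--     ]
--     base = [{'text': t, 'category': c} for c, texts in groups for t in texts]
--     n = len(base)
--     if count <= n:
--         return base[:count]
--     full, rem = divmod(count, n)
--     return base * full + base[:rem]
-- ===== Notes on version B (the rewrite author's own statement) =====
-- stated objective: simpler
-- what changed: B builds the base list from five (category, texts) groups by a flat comprehension instead of a hand-written flat list of dicts, and replaces A's list-doubling while-loop by one divmod: base*full + base[:rem], with a plain slice when count does not exceed the base length.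
import Mathlib
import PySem

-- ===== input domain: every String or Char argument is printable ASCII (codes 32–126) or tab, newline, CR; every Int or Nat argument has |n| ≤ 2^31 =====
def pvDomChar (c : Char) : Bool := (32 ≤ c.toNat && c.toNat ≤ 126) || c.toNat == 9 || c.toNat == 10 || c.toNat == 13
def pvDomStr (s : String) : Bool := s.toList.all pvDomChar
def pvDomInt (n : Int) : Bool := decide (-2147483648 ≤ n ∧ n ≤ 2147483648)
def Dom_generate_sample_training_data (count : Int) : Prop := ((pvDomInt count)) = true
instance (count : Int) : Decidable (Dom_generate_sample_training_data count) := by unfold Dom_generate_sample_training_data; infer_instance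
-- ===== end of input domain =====

-- B builds the base from (category, texts) groups and tiles it with one divmod (base*full + base[:rem]) instead of A's doubling while-loop (objective: simpler); same return value.

-- ===== PORT A =====
-- the 25-element literal `samples` list (each dict is an association list in insertion order)
def pvBase : List (List (String × String)) := [
  [("text", "URGENT: Server down, production affected"), ("category", "urgent")],
  [("text", "Critical bug in payment system"), ("category", "urgent")],
  [("text", "Emergency meeting in 10 minutes"), ("category", "urgent")],
  [("text", "Security breach detected"), ("category", "urgent")],
  [("text", "Immediate action required: data loss"), ("category", "urgent")],
  [("text", "Quarterly review meeting tomorrow"), ("category", "important")],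
  [("text", "Please review and approve budget"), ("category", "important")],
  [("text", "Contract needs your signature"), ("category", "important")],
  [("text", "Project deadline approaching"), ("category", "important")],
  [("text", "Client feedback on proposal"), ("category", "important")],
  [("text", "You won a million dollars! Click here"), ("category", "spam")],
  [("text", "Enlarge your business today!!!"), ("category", "spam")],
  [("text", "Free money waiting for you"), ("category", "spam")],
  [("text", "Nigerian prince needs your help"), ("category", "spam")],
  [("text", "Congratulations! You are a winner"), ("category", "spam")],
  [("text", "50% off all products this weekend"), ("category", "promotional")],
  [("text", "New features in our latest release"), ("category", "promotional")],
  [("text", "Subscribe to our newsletter"), ("category", "promotional")],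
  [("text", "Special offer just for you"), ("category", "promotional")],
  [("text", "Join our webinar next week"), ("category", "promotional")],
  [("text", "Weekly team update"), ("category", "informational")],
  [("text", "FYI: New office hours"), ("category", "informational")],
  [("text", "Documentation has been updated"), ("category", "informational")],
  [("text", "Reminder: company holiday next week"), ("category", "informational")],
  [("text", "Monthly newsletter"), ("category", "informational")]]

-- A's `while len(samples) < count: samples.extend(samples[:min(len(samples), count - len(samples))])`;
-- fuel only makes the recursion total (it is never exhausted on the reachable states)
def pvLoopA (fuel : Nat) (count : Int) (samples : List (List (String × String))) : List (List (String × String)) :=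
  match fuel with
  | 0 => samples
  | fuel + 1 =>
    if (samples.length : Int) < count then
      pvLoopA fuel count
        (samples ++ PySem.List.slice samples none (some (min (samples.length : Int) (count - samples.length))))
    else samples

def generate_sample_training_data (count : Int) : List (List (String × String)) :=
  PySem.List.slice (pvLoopA count.toNat count pvBase) none (some count)

-- ===== PORT B =====
-- Source B's `groups`: five (category, list-of-texts) pairs
def pvGroups : List (String × List String) := [
  ("urgent",
    ["URGENT: Server down, production affected",
     "Critical bug in payment system",
     "Emergency meeting in 10 minutes",
     "Security breach detected",
     "Immediate action required: data loss"]),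
  ("important",
    ["Quarterly review meeting tomorrow",
     "Please review and approve budget",
     "Contract needs your signature",
     "Project deadline approaching",
     "Client feedback on proposal"]),
  ("spam",
    ["You won a million dollars! Click here",
     "Enlarge your business today!!!",
     "Free money waiting for you",
     "Nigerian prince needs your help",
     "Congratulations! You are a winner"]),
  ("promotional",
    ["50% off all products this weekend",
     "New features in our latest release",
     "Subscribe to our newsletter",
     "Special offer just for you",
     "Join our webinar next week"]),
  ("informational",
    ["Weekly team update",
     "FYI: New office hours",
     "Documentation has been updated",
     "Reminder: company holiday next week",
     "Monthly newsletter"])]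

-- Source B's `base = [{'text': t, 'category': c} for c, texts in groups for t in texts]`
def pvBaseB : List (List (String × String)) :=
  pvGroups.flatMap (fun g => g.2.map (fun t => [("text", t), ("category", g.1)]))

def generate_sample_training_data_alt (count : Int) : List (List (String × String)) :=
  let n : Int := (pvBaseB.length : Int)
  if count ≤ n then
    PySem.List.slice pvBaseB none (some count)
  else
    -- full, rem = divmod(count, n); base * full + base[:rem]  (0 ≤ rem < n here)
    let full := PySem.Int.floordiv count n
    let rem := PySem.Int.mod count n
    (List.replicate full.toNat pvBaseB).flatten ++ pvBaseB.take rem.toNat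

-- ===== PRECONDITION & SPEC =====
def Spec_generate_sample_training_data (count : Int) (out : List (List (String × String))) : Prop := out = generate_sample_training_data_alt count
instance (count : Int) (out : List (List (String × String))) : Decidable (Spec_generate_sample_training_data count out) := by unfold Spec_generate_sample_training_data; infer_instance

-- ===== CLAIM (what is proved, stated in full; the proofs are below) =====
def Claim_equal_generate_sample_training_data : Prop := ∀ (count : Int), Dom_generate_sample_training_data count → Spec_generate_sample_training_data count (generate_sample_training_data count)

-- ===== LEMMAS AND PROOFS =====

-- the infinite cyclic repetition of pvBase, truncated to m elements
def pvF (i : Nat) : List (String × String) := pvBase.getD (i % 25) []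
def pvCyc (m : Nat) : List (List (String × String)) := (List.range m).map pvF

theorem pvCyc_length (m : Nat) : (pvCyc m).length = m := by simp [pvCyc]

theorem pvCyc_25 : pvCyc 25 = pvBase := by decide

theorem pvBaseB_eq : pvBaseB = pvBase := by decide

theorem pvCyc_take (k m : Nat) (h : k ≤ m) : (pvCyc m).take k = pvCyc k := by
  simp [pvCyc, ← List.map_take, List.take_range, Nat.min_eq_left h]

theorem pvCyc_append (m k : Nat) (h : 25 ∣ m) : pvCyc m ++ pvCyc k = pvCyc (m + k) := by
  unfold pvCyc
  rw [List.range_add, List.map_append, List.map_map]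
  congr 1
  apply List.map_congr_left
  intro i _
  simp only [Function.comp, pvF]
  congr 1
  omega

theorem pvCyc_flatten_replicate (k : Nat) :
    (List.replicate k (pvCyc 25)).flatten = pvCyc (25 * k) := by
  induction k with
  | zero => rfl
  | succ k ih =>
    rw [List.replicate_succ, List.flatten_cons, ih, pvCyc_append 25 (25 * k) ⟨1, rfl⟩]
    congr 1
    omega

theorem pvLoopA_done (fuel : Nat) (count : Int) (samples : List (List (String × String)))
    (h : count ≤ (samples.length : Int)) : pvLoopA fuel count samples = samples := by
  cases fuel with
  | zero => rfl
  | succ fuel => simp [pvLoopA, not_lt.mpr h]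

theorem pvLoopA_eq (count : Int) (fuel m : Nat) (hm : 0 < m) (h25 : 25 ∣ m)
    (hfuel : count ≤ (m : Int) + fuel) (hlt : (m : Int) < count) :
    pvLoopA fuel count (pvCyc m) = pvCyc count.toNat := by
  induction fuel generalizing m with
  | zero => omega
  | succ fuel ih =>
    rw [pvLoopA]
    rw [pvCyc_length]
    rw [if_pos hlt]
    have hk0 : 0 ≤ min (m : Int) (count - (m : Int)) := by omega
    rw [PySem.List.slice_to _ hk0]
    have hkle : (min (m : Int) (count - (m : Int))).toNat ≤ m := by omega
    rw [pvCyc_take _ _ hkle, pvCyc_append _ _ h25]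
    by_cases hcase : count - (m : Int) ≤ (m : Int)
    · -- final extension: length reaches exactly count
      have hmeq : m + (min (m : Int) (count - (m : Int))).toNat = count.toNat := by omega
      rw [hmeq]
      apply pvLoopA_done
      rw [pvCyc_length]; omega
    · -- doubling step
      have hmeq : m + (min (m : Int) (count - (m : Int))).toNat = 2 * m := by omega
      rw [hmeq]
      exact ih (2 * m) (by omega) (by omega) (by push_cast; omega) (by push_cast; omega)

-- ===== VERDICT (by name: the statement is the Claim_ definition above) =====
theorem generate_sample_training_data_spec : Claim_equal_generate_sample_training_data := by
  intro count _
  unfold Spec_generate_sample_training_data generate_sample_training_data generate_sample_training_data_alt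
  rw [pvBaseB_eq]
  have hlen : pvBase.length = 25 := rfl
  show _ = if count ≤ (pvBase.length : Int) then _ else _
  rw [hlen, Nat.cast_ofNat]
  by_cases h : count ≤ (25 : Int)
  · rw [if_pos h, pvLoopA_done _ _ _ (by rw [hlen]; exact_mod_cast h)]
  · rw [if_neg h]
    have h25 : (0 : Int) < 25 := by omega
    have hdm : PySem.Int.floordiv count 25 * 25 + PySem.Int.mod count 25 = count :=
      PySem.Int.floordiv_mul_add_mod count 25
    have hr0 : 0 ≤ PySem.Int.mod count 25 := by
      rw [PySem.Int.mod_eq_emod_of_pos h25]; omega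
    have hr25 : PySem.Int.mod count 25 < 25 := by
      rw [PySem.Int.mod_eq_emod_of_pos h25]; omega
    have hf0 : 0 ≤ PySem.Int.floordiv count 25 := by omega
    conv_lhs => rw [show pvBase = pvCyc 25 from pvCyc_25.symm]
    rw [pvLoopA_eq count count.toNat 25 (by omega) (by omega) (by omega) (by omega)]
    rw [PySem.List.slice_to _ (by omega)]
    rw [List.take_of_length_le (by rw [pvCyc_length])]
    rw [show pvBase = pvCyc 25 from pvCyc_25.symm]
    show pvCyc count.toNat = (List.replicate _ _).flatten ++ _
    rw [pvCyc_flatten_replicate, pvCyc_take _ 25 (by omega), pvCyc_append _ _ ⟨_, rfl⟩]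
    congr 1
    omega
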